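-- pv_equiv track=rewrite | github.com/vladvlad23/UBBComputerScienceBachelor | FundamentalsOfProgramming/Assignment11/main.py | backtrackingIterative
-- ===== SOURCE A (Python) =====
-- def createSet(newIndexSet,givenSet):
--     newSet = []
--     for i in range(len(givenSet)):
--         if newIndexSet[i] == 0:
--             newSet.append(givenSet[i])
--         else:
--             newSet.append(givenSet[i]*(-1))
--     return newSet
--
-- def solution(indexSet,givenSet):
--     newSet = createSet(indexSet,givenSet)
--     if sum(newSet)>0:
--         return newSet
--     else:
--         return None
--
-- def backtrackingIterative(givenSet):
--     stackReplacement = []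
--     solutions = []
--     stackReplacement.append([0])
--     stackReplacement.append([1])
--     while len(stackReplacement)!=0:
--         indexSet = stackReplacement.pop()
--         if len(indexSet) == len(givenSet):
--             set = solution(indexSet,givenSet)
--             if set is not None:
--                 solutions.append(set)
--         if len(indexSet)<len(givenSet):
--             indexSetWithPlus = indexSet[:]
--             indexSetWithPlus.append(0)
--
--             indexSetWithMinus = indexSet[:]
--             indexSetWithMinus.append(1)
--             stackReplacement.append(indexSetWithPlus)
--             stackReplacement.append(indexSetWithMinus)
--
--     return solutions
-- ===== SOURCE B (Python) =====
-- def backtrackingIterative(givenSet):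
--     n = len(givenSet)
--     solutions = []
--
--     def rec(indexSet):
--         if len(indexSet) < n:
--             rec(indexSet + [1])
--             rec(indexSet + [0])
--         else:
--             signed = [-v if b else v for b, v in zip(indexSet, givenSet)]
--             if sum(signed) > 0:
--                 solutions.append(signed)
--
--     rec([])
--     return solutions
-- ===== Notes on version B (the rewrite author's own statement) =====
-- stated objective: simpler
-- what changed: Replaced the explicit-stack iterative DFS (manual stack of index sets plus separate createSet/solution helpers) with a short recursive backtracking helper that builds the signed set via zip and appends it when the sum is positive, recursing on the minus branch first to keep the exact emission order.
import Mathlib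
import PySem

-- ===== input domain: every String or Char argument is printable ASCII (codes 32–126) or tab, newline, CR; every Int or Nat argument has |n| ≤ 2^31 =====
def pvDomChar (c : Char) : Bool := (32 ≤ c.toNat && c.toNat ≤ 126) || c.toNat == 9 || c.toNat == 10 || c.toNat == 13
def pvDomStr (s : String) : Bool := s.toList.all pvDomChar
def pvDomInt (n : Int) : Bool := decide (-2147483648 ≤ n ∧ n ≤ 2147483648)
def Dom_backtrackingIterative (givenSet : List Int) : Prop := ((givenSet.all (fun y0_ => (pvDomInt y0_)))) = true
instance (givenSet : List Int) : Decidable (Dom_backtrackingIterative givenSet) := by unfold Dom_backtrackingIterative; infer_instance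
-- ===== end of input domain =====

-- B replaces A's explicit-stack DFS with recursive backtracking (different decomposition,
-- same emitted order); objective: simpler, no speed claim.

-- ===== PORT A =====
-- createSet: for i in range(len(givenSet)): append ±givenSet[i] depending on newIndexSet[i].
-- Indices are always in range at A's call sites (equal lengths), so pyGetD's default is never used.
def pvCreateSet (newIndexSet givenSet : List Int) : List Int :=
  (List.range givenSet.length).foldl (fun (newSet : List Int) (i : Nat) =>
    if PySem.List.pyGetD newIndexSet (i : Int) 0 == 0 then
      newSet ++ [PySem.List.pyGetD givenSet (i : Int) 0]
    else
      newSet ++ [PySem.List.pyGetD givenSet (i : Int) 0 * (-1)]) []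

def pvSolution (indexSet givenSet : List Int) : Option (List Int) :=
  let newSet := pvCreateSet indexSet givenSet
  if newSet.sum > 0 then some newSet else none

-- weight/measure for termination of A's while-loop (a popped item is replaced by
-- two strictly longer items, or by nothing)
def pvWeight (n l : Nat) : Nat := if l ≤ n then 3 ^ (n - l) else 1

def pvStackMeasure (n : Nat) (st : List (List Int)) : Nat :=
  (st.map (fun s => pvWeight n s.length)).sum

theorem pvWeight_pos (n l : Nat) : 0 < pvWeight n l := by
  unfold pvWeight; split
  · exact Nat.pow_pos (by omega)
  · omega

theorem pvWeight_two_lt (n l : Nat) (h : l < n) :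
    pvWeight n (l + 1) + pvWeight n (l + 1) < pvWeight n l := by
  unfold pvWeight
  rw [if_pos (by omega), if_pos (by omega)]
  have h1 : n - l = (n - (l + 1)) + 1 := by omega
  rw [h1, pow_succ]
  have h2 : 1 ≤ 3 ^ (n - (l + 1)) := Nat.one_le_pow _ _ (by omega)
  omega

-- A's while-loop: the Python list is a stack (append/pop at the same end);
-- it is represented with its TOP at the head, so append-then-pop order is preserved.
def pvLoopA (givenSet : List Int) (stack : List (List Int)) (sols : List (List Int)) :
    List (List Int) :=
  match stack with
  | [] => sols
  | indexSet :: rest =>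
    let sols' :=
      if indexSet.length == givenSet.length then
        match pvSolution indexSet givenSet with
        | some s => sols ++ [s]
        | none => sols
      else sols
    if indexSet.length < givenSet.length then
      -- push indexSetWithPlus, then indexSetWithMinus (minus ends on top)
      pvLoopA givenSet ((indexSet ++ [1]) :: (indexSet ++ [0]) :: rest) sols'
    else
      pvLoopA givenSet rest sols'
termination_by pvStackMeasure givenSet.length stack
decreasing_by
  · simp only [pvStackMeasure, List.map_cons, List.sum_cons, List.length_append,
      List.length_singleton]
    have := pvWeight_two_lt givenSet.length indexSet.length (by omega)
    omega
  · simp only [pvStackMeasure, List.map_cons, List.sum_cons]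
    have := pvWeight_pos givenSet.length indexSet.length
    omega

-- push [0] then [1] ([1] on top), then run the loop
def backtrackingIterative (givenSet : List Int) : List (List Int) :=
  pvLoopA givenSet [[1], [0]] []

-- ===== PORT B =====
-- recursive backtracking; `solutions` is threaded as an accumulator
def pvRecB (givenSet : List Int) (indexSet : List Int) (sols : List (List Int)) :
    List (List Int) :=
  if indexSet.length < givenSet.length then
    pvRecB givenSet (indexSet ++ [0]) (pvRecB givenSet (indexSet ++ [1]) sols)
  else
    let signed := (indexSet.zip givenSet).map (fun p => if p.1 != 0 then -p.2 else p.2)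
    if signed.sum > 0 then sols ++ [signed] else sols
termination_by givenSet.length - indexSet.length
decreasing_by all_goals simp; omega

def backtrackingIterative_alt (givenSet : List Int) : List (List Int) :=
  pvRecB givenSet [] []

-- ===== PRECONDITION & SPEC =====
def Spec_backtrackingIterative (givenSet : List Int) (out : List (List Int)) : Prop := out = backtrackingIterative_alt givenSet
instance (givenSet : List Int) (out : List (List Int)) : Decidable (Spec_backtrackingIterative givenSet out) := by unfold Spec_backtrackingIterative; infer_instance

-- ===== CLAIM (what is proved, stated in full; the proofs are below) =====
def Claim_equal_backtrackingIterative : Prop := ∀ (givenSet : List Int), Dom_backtrackingIterative givenSet → Spec_backtrackingIterative givenSet (backtrackingIterative givenSet)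

-- ===== LEMMAS AND PROOFS =====

-- A's createSet equals B's zip/map when the index set has the right length
theorem pvCreateSet_eq (idx g : List Int) (h : idx.length = g.length) :
    pvCreateSet idx g = (idx.zip g).map (fun p => if p.1 != 0 then -p.2 else p.2) := by
  unfold pvCreateSet
  have hfun : (fun (newSet : List Int) (i : Nat) =>
      if PySem.List.pyGetD idx (i : Int) 0 == 0 then
        newSet ++ [PySem.List.pyGetD g (i : Int) 0]
      else
        newSet ++ [PySem.List.pyGetD g (i : Int) 0 * (-1)]) =
      fun (newSet : List Int) (i : Nat) => newSet ++ [if PySem.List.pyGetD idx (i : Int) 0 == 0 then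
        PySem.List.pyGetD g (i : Int) 0 else PySem.List.pyGetD g (i : Int) 0 * (-1)] := by
    funext a i; split <;> rfl
  rw [hfun, PySem.List.foldl_append_singleton_eq_map, List.nil_append]
  apply List.ext_getElem
  · simp [h]
  · intro i h1 h2
    simp only [List.getElem_map, List.getElem_range, List.getElem_zip]
    have hi : i < g.length := by simpa using h1
    rw [PySem.List.pyGetD_natCast, PySem.List.pyGetD_natCast]
    have hidx : i < idx.length := by omega
    simp only [List.getD_eq_getElem _ _ hi, List.getD_eq_getElem _ _ hidx]
    by_cases hz : idx[i] = 0 <;> simp [hz]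

-- one stack item of length ≤ n is processed by the loop exactly as pvRecB processes it
theorem pvLoopA_cons (g : List Int) (k : Nat) :
    ∀ s rest sols, g.length - s.length = k → s.length ≤ g.length →
      pvLoopA g (s :: rest) sols = pvLoopA g rest (pvRecB g s sols) := by
  induction k with
  | zero =>
    intro s rest sols hk hle
    have hlen : s.length = g.length := by omega
    rw [pvLoopA, pvRecB, pvSolution, pvCreateSet_eq s g hlen]
    simp only [hlen, beq_self_eq_true, if_true, lt_self_iff_false, if_false]
    generalize (List.map (fun p => if (p.1 != 0) = true then -p.2 else p.2) (s.zip g)) = t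
    by_cases hp : t.sum > 0 <;> simp [hp]
  | succ k ih =>
    intro s rest sols hk hle
    have hlt : s.length < g.length := by omega
    rw [pvLoopA, pvRecB]
    rw [if_pos hlt, if_pos hlt]
    rw [if_neg (by simp; omega)]
    rw [ih (s ++ [1]) _ sols (by simp; omega) (by simp; omega)]
    rw [ih (s ++ [0]) _ _ (by simp; omega) (by simp; omega)]

-- ===== VERDICT (by name: the statement is the Claim_ definition above) =====
theorem backtrackingIterative_spec : Claim_equal_backtrackingIterative := by
  intro g _
  unfold Spec_backtrackingIterative backtrackingIterative backtrackingIterative_alt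
  rcases g with _ | ⟨y, ys⟩
  · simp [pvLoopA, pvRecB]
  · rw [pvLoopA_cons (y :: ys) ((y :: ys).length - 1) [1] _ _ (by simp)
      (by simp only [List.length_cons, List.length_nil]; omega)]
    rw [pvLoopA_cons (y :: ys) ((y :: ys).length - 1) [0] _ _ (by simp)
      (by simp only [List.length_cons, List.length_nil]; omega)]
    rw [pvLoopA]
    conv_rhs => rw [pvRecB]
    rw [if_pos (by simp)]
    simp
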